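-- pv_equiv track=rewrite | github.com/Saad030303/Translation_Pipeline_i18n | i18n_seed_pipeline/i18n_seed/reinjector.py | _looks_like_address_dict
-- ===== SOURCE A (Python) =====
-- from typing import Dict, List, Optional, Tuple, Any
--
-- _ADDR_ALIASES = {
--     "address_line_1": ["address_line_1", "addressLine1", "line1", "line_1", "address1", "addr1"],
--     "city": ["city"],
--     "state_or_region": ["state_or_region", "stateOrRegion", "state"],
--     "country_code": ["country_code", "countryCode", "country"],
--     "postal_code": ["postal_code", "postalCode", "postal", "zip", "zipCode"],
--     "name": ["name"],
-- }
--
-- def _looks_like_address_dict(d: Any) -> bool: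
--     if not isinstance(d, dict):
--         return False
--     for aliases in _ADDR_ALIASES.values():
--         for k in aliases:
--             if k in d:
--                 return True
--     return False
-- ===== SOURCE B (Python) =====
-- _ADDR_ALIASES = {
--     "address_line_1": ["address_line_1", "addressLine1", "line1", "line_1", "address1", "addr1"],
--     "city": ["city"],
--     "state_or_region": ["state_or_region", "stateOrRegion", "state"],
--     "country_code": ["country_code", "countryCode", "country"],
--     "postal_code": ["postal_code", "postalCode", "postal", "zip", "zipCode"],
--     "name": ["name"],
-- }
--
-- _ALL_ALIASES = frozenset(a for aliases in _ADDR_ALIASES.values() for a in aliases)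
--
-- def _looks_like_address_dict(d) -> bool:
--     if not isinstance(d, dict):
--         return False
--     return any(k in _ALL_ALIASES for k in d)
-- ===== Notes on version B (the rewrite author's own statement) =====
-- stated objective: idiomatic
-- what changed: B flattens the nested alias lists once into a module-level frozenset and reverses the traversal: it iterates over the input dict's keys and tests each against that flat set, instead of looping over the nested alias lists and probing the dict for each alias.
import Mathlib
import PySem

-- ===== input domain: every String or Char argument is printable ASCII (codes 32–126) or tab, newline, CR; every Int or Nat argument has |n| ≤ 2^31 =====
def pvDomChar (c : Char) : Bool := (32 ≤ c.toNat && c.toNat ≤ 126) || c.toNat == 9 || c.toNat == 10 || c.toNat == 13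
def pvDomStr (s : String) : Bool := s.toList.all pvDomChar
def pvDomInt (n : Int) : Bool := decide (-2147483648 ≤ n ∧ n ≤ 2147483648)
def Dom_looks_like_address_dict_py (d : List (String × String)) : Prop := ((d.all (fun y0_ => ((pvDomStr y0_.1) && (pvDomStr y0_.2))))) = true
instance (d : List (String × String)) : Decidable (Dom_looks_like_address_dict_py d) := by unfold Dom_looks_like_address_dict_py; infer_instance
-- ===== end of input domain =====

-- B flattens the nested alias lists into one flat set and iterates over the input dict's keys instead of probing the dict per alias (idiomatic; same asymptotic cost).


-- ===== PORT A =====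
-- the module constant _ADDR_ALIASES, only the values (alias lists) matter to the loop
def addrAliasLists : List (List String) :=
  [["address_line_1", "addressLine1", "line1", "line_1", "address1", "addr1"],
   ["city"],
   ["state_or_region", "stateOrRegion", "state"],
   ["country_code", "countryCode", "country"],
   ["postal_code", "postalCode", "postal", "zip", "zipCode"],
   ["name"]]

-- A: for aliases in _ADDR_ALIASES.values(): for k in aliases: if k in d: return True; return False
-- (the isinstance(d, dict) guard is always satisfied under the type convention)
def looks_like_address_dict_py (d : List (String × String)) : Bool :=
  addrAliasLists.any (fun aliases => aliases.any (fun k => (PySem.Dict.mk d).contains k))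

-- ===== PORT B =====
-- the module constant _ALL_ALIASES: the aliases flattened into one flat set
def allAliases : List String :=
  ["address_line_1", "addressLine1", "line1", "line_1", "address1", "addr1",
   "city",
   "state_or_region", "stateOrRegion", "state",
   "country_code", "countryCode", "country",
   "postal_code", "postalCode", "postal", "zip", "zipCode",
   "name"]

-- B: any(k in _ALL_ALIASES for k in d)
def looks_like_address_dict_py_alt (d : List (String × String)) : Bool :=
  d.any (fun p => allAliases.contains p.1)

-- ===== PRECONDITION & SPEC =====
def Spec_looks_like_address_dict_py (d : List (String × String)) (out : Bool) : Prop := out = looks_like_address_dict_py_alt d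
instance (d : List (String × String)) (out : Bool) : Decidable (Spec_looks_like_address_dict_py d out) := by unfold Spec_looks_like_address_dict_py; infer_instance

-- ===== CLAIM (what is proved, stated in full; the proofs are below) =====
def Claim_equal_looks_like_address_dict_py : Prop := ∀ (d : List (String × String)), Dom_looks_like_address_dict_py d → Spec_looks_like_address_dict_py d (looks_like_address_dict_py d)

-- ===== LEMMAS AND PROOFS =====
-- the two traversal orders agree: probing d for each alias of L = scanning d's keys against L
theorem any_swap (L : List String) (d : List (String × String)) :
    (L.any (fun k => (PySem.Dict.mk d).contains k)) = d.any (fun p => L.contains p.1) := by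
  rw [Bool.eq_iff_iff]
  simp only [List.any_eq_true, PySem.Dict.contains_eq_decide_mem_keys,
    PySem.Dict.keys, List.mem_map, decide_eq_true_eq, List.contains_iff_mem]
  constructor
  · rintro ⟨k, hk, p, hp, rfl⟩; exact ⟨p, hp, hk⟩
  · rintro ⟨p, hp, hk⟩; exact ⟨p.1, hk, p, hp, rfl⟩

-- ===== VERDICT (by name: the statement is the Claim_ definition above) =====
theorem looks_like_address_dict_py_spec : Claim_equal_looks_like_address_dict_py := by
  intro d _
  unfold Spec_looks_like_address_dict_py looks_like_address_dict_py looks_like_address_dict_py_alt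
  rw [← List.any_flatten]
  have hflat : addrAliasLists.flatten = allAliases := by decide
  rw [hflat, any_swap]
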